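-- pv_equiv track=rewrite | github.com/Nghia03092004/nghia03092004.github.io | project_euler/problem_628/solution.py | is_open_bruteforce
-- ===== SOURCE A (Python) =====
-- from collections import deque
--
-- def is_open_bruteforce(perm: tuple[int, ...]) -> bool:
--     """Check openness by BFS on the board squares."""
--     n = len(perm)
--     blocked = {(row + 1, perm[row]) for row in range(n)}
--     start = (1, 1)
--     goal = (n, n)
--     if start in blocked or goal in blocked:
--         return False
--
--     queue = deque([start])
--     seen = {start}
--     while queue:
--         row, col = queue.popleft()
--         if (row, col) == goal:
--             return True
--         for next_row, next_col in ((row + 1, col), (row, col + 1)):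
--             if (
--                 1 <= next_row <= n
--                 and 1 <= next_col <= n
--                 and (next_row, next_col) not in blocked
--                 and (next_row, next_col) not in seen
--             ):
--                 seen.add((next_row, next_col))
--                 queue.append((next_row, next_col))
--     return False
-- ===== SOURCE B (Python) =====
-- def is_open_bruteforce(perm):
--     """Row sweep tracking the reachable columns of each row as at most two
--     intervals (each row has a single blocked cell), instead of BFS."""
--     n = len(perm)
--     if n == 0:
--         return False
--     b = perm[0]
--     if b == 1:
--         return False
--     intervals = [(1, b - 1 if 1 <= b <= n else n)]
--     for r in range(1, n):
--         b = perm[r]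
--         if 1 <= b <= n:
--             m1 = None  # min reachable column of the previous row left of b
--             m2 = None  # min column > b reachable in this row by a down move
--             for lo, hi in intervals:
--                 if lo < b and (m1 is None or lo < m1):
--                     m1 = lo
--                 if hi > b:
--                     cand = lo if lo > b else b + 1
--                     if m2 is None or cand < m2:
--                         m2 = cand
--             new = []
--             if m1 is not None:
--                 new.append((m1, b - 1))
--             if m2 is not None:
--                 new.append((m2, n))
--             if not new:
--                 return False
--             intervals = new
--         else:
--             intervals = [(intervals[0][0], n)]
--     return any(lo <= n <= hi for lo, hi in intervals)
-- ===== Notes on version B (the rewrite author's own statement) =====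
-- stated objective: faster
-- what changed: Replaces BFS over all board cells with a single left-to-right row sweep that maintains the set of reachable columns of the current row as at most two intervals split by the row's unique blocked cell.
import Mathlib
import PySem

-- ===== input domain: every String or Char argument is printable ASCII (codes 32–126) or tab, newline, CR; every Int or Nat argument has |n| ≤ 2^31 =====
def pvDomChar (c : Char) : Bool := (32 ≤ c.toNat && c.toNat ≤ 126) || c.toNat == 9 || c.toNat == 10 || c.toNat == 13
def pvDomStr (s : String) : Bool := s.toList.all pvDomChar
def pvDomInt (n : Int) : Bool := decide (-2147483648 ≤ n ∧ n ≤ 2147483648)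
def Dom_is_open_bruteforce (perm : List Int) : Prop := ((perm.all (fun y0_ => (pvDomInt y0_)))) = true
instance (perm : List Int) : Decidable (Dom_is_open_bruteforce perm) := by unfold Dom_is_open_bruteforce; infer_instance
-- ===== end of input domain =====

-- B replaces A's BFS over the board cells by a single row sweep that keeps the
-- reachable columns of the current row as at most two intervals (objective:
-- faster; a timing run measures the speed-up).

-- ===== PORT A =====
-- blocked = {(row + 1, perm[row]) for row in range(n)}
def pvBl (perm : List Int) : List (Int × Int) :=
  PySem.Set.ofList ((PySem.List.enumerate perm).map (fun iv => (iv.1 + 1, iv.2)))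

-- body of A's inner `for next_row, next_col in ...` loop
def pvStep (n : Int) (bl : List (Int × Int)) (qs : List (Int × Int) × List (Int × Int))
    (p : Int × Int) : List (Int × Int) × List (Int × Int) :=
  if 1 ≤ p.1 ∧ p.1 ≤ n ∧ 1 ≤ p.2 ∧ p.2 ≤ n ∧ ¬ p ∈ bl ∧ ¬ p ∈ qs.2 then
    (qs.1 ++ [p], qs.2 ++ [p])
  else qs

-- A's `while queue:` loop; the fuel argument only makes the recursion structural
-- (the proofs show it is never exhausted for the initial fuel below)
def pvBfs (n : Int) (bl : List (Int × Int)) (goal : Int × Int) :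
    Nat → List (Int × Int) → List (Int × Int) → Bool
  | 0, _, _ => false
  | _ + 1, [], _ => false
  | f + 1, p :: rest, seen =>
    if p = goal then true
    else
      let qs := [(p.1 + 1, p.2), (p.1, p.2 + 1)].foldl (pvStep n bl) (rest, seen)
      pvBfs n bl goal f qs.1 qs.2

def is_open_bruteforce (perm : List Int) : Bool :=
  let n : Int := perm.length
  let bl := pvBl perm
  let start : Int × Int := (1, 1)
  let goal : Int × Int := (n, n)
  if start ∈ bl ∨ goal ∈ bl then false
  else pvBfs n bl goal (n.toNat * n.toNat + 2) [start] [start]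

-- ===== PORT B =====
-- body of B's inner `for lo, hi in intervals` loop: the running minima m1, m2
def pvRowMins (b : Int) (ms : Option Int × Option Int) (lh : Int × Int) :
    Option Int × Option Int :=
  let m1 := match ms.1 with
    | none => if lh.1 < b then some lh.1 else none
    | some m => if lh.1 < b ∧ lh.1 < m then some lh.1 else some m
  let m2 := if lh.2 > b then
      let cand := if lh.1 > b then lh.1 else b + 1
      match ms.2 with
      | none => some cand
      | some m => if cand < m then some cand else some m
    else ms.2
  (m1, m2)

-- one iteration of B's `for r in range(1, n)` loop (none = B returned False)
def pvRowStep (n : Int) (st : Option (List (Int × Int))) (b : Int) :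
    Option (List (Int × Int)) :=
  match st with
  | none => none
  | some intervals =>
    if 1 ≤ b ∧ b ≤ n then
      let ms := intervals.foldl (pvRowMins b) (none, none)
      let nw := (match ms.1 with | some m1 => [(m1, b - 1)] | none => []) ++
                (match ms.2 with | some m2 => [(m2, n)] | none => [])
      if nw = [] then none else some nw
    else
      some [((intervals.headD (0, 0)).1, n)]

def is_open_bruteforce_alt (perm : List Int) : Bool :=
  let n : Int := perm.length
  if n = 0 then false
  else
    let b0 := perm.headD 0
    if b0 = 1 then false
    else
      let init : List (Int × Int) := [(1, if 1 ≤ b0 ∧ b0 ≤ n then b0 - 1 else n)]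
      match perm.tail.foldl (pvRowStep n) (some init) with
      | none => false
      | some intervals => intervals.any (fun lh => decide (lh.1 ≤ n ∧ n ≤ lh.2))

-- ===== PRECONDITION & SPEC =====
def Spec_is_open_bruteforce (perm : List Int) (out : Bool) : Prop := out = is_open_bruteforce_alt perm
instance (perm : List Int) (out : Bool) : Decidable (Spec_is_open_bruteforce perm out) := by unfold Spec_is_open_bruteforce; infer_instance

-- ===== CLAIM (what is proved, stated in full; the proofs are below) =====
def Claim_equal_is_open_bruteforce : Prop := ∀ (perm : List Int), Dom_is_open_bruteforce perm → Spec_is_open_bruteforce perm (is_open_bruteforce perm)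

-- ===== LEMMAS AND PROOFS =====

def pvGrid (n : Int) : List (Int × Int) :=
  (1, 1) :: (List.range n.toNat).flatMap
    (fun i => (List.range n.toNat).map (fun j => ((i : Int) + 1, (j : Int) + 1)))

lemma pvGrid_length (n : Int) : (pvGrid n).length = n.toNat * n.toNat + 1 := by
  simp [pvGrid, List.length_flatMap, Function.comp, Nat.mul_comm]

lemma pvMem_pvGrid (n : Int) (p : Int × Int) :
    p ∈ pvGrid n ↔ p = (1, 1) ∨ (1 ≤ p.1 ∧ p.1 ≤ n ∧ 1 ≤ p.2 ∧ p.2 ≤ n) := by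
  rcases p with ⟨r, c⟩
  simp [pvGrid, List.mem_flatMap, Prod.ext_iff]
  constructor
  · rintro (⟨h1, h2⟩ | ⟨i, hi, j, hj, h1, h2⟩)
    · exact Or.inl ⟨h1, h2⟩
    · right; omega
  · rintro (⟨h1, h2⟩ | ⟨h1, h2, h3, h4⟩)
    · exact Or.inl ⟨h1, h2⟩
    · right
      refine ⟨(r - 1).toNat, by omega, (c - 1).toNat, by omega, by omega, by omega⟩

lemma pvSeen_length_le (n : Int) (s : List (Int × Int)) (hnd : s.Nodup)
    (hg : ∀ x ∈ s, x ∈ pvGrid n) : s.length ≤ (pvGrid n).length :=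
  (List.subperm_of_subset hnd hg).length_le

lemma pvMem_pvBl (perm : List Int) (p : Int × Int) :
    p ∈ pvBl perm ↔ ∃ k : Nat, k < perm.length ∧ p = ((k : Int) + 1, perm.getD k 0) := by
  simp only [List.getD_eq_getElem?_getD]
  simp [pvBl, PySem.Set.mem_ofList, List.mem_map, PySem.List.mem_enumerate_iff]
  constructor
  · rintro ⟨k, hk, rfl⟩
    exact ⟨k, hk, by simp [List.getElem?_eq_getElem hk]⟩
  · rintro ⟨k, hk, rfl⟩
    exact ⟨k, hk, by simp [List.getElem?_eq_getElem hk]⟩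

lemma pvMem_pvBl' (perm : List Int) (r c : Int) :
    (r, c) ∈ pvBl perm ↔ 1 ≤ r ∧ r ≤ (perm.length : Int) ∧ c = perm.getD (r - 1).toNat 0 := by
  rw [pvMem_pvBl]
  constructor
  · rintro ⟨k, hk, h⟩
    have h1 : r = (k : Int) + 1 := (Prod.ext_iff.mp h).1
    have h2 : c = perm.getD k 0 := (Prod.ext_iff.mp h).2
    refine ⟨by omega, by omega, ?_⟩
    have : (r - 1).toNat = k := by omega
    rw [this]; exact h2
  · rintro ⟨h1, h2, h3⟩
    refine ⟨(r - 1).toNat, by omega, ?_⟩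
    rw [← h3]
    have : ((r - 1).toNat : Int) + 1 = r := by omega
    rw [this]

def pvAdj (n : Int) (bl : List (Int × Int)) (p q : Int × Int) : Prop :=
  (q = (p.1 + 1, p.2) ∨ q = (p.1, p.2 + 1)) ∧
  1 ≤ q.1 ∧ q.1 ≤ n ∧ 1 ≤ q.2 ∧ q.2 ≤ n ∧ ¬ q ∈ bl

def pvReach (n : Int) (bl : List (Int × Int)) (p q : Int × Int) : Prop :=
  Relation.ReflTransGen (pvAdj n bl) p q

lemma pvReach_mono (n : Int) (bl : List (Int × Int)) (p q : Int × Int)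
    (h : pvReach n bl p q) : p.1 ≤ q.1 ∧ p.2 ≤ q.2 := by
  induction h with
  | refl => exact ⟨le_refl _, le_refl _⟩
  | tail _ hadj ih =>
    rcases hadj.1 with h' | h' <;> subst h' <;> simp <;> omega


lemma pvReach_dest (n : Int) (bl : List (Int × Int)) (p : Int × Int)
    (h : pvReach n bl (1, 1) p) :
    p = (1, 1) ∨ (1 ≤ p.1 ∧ p.1 ≤ n ∧ 1 ≤ p.2 ∧ p.2 ≤ n ∧ ¬ p ∈ bl) := by
  rcases Relation.ReflTransGen.cases_tail h with h' | ⟨q, _, hadj⟩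
  · exact Or.inl h'
  · exact Or.inr hadj.2

-- extend reachability rightwards along a free stretch of one row

lemma pvStep_foldl (n : Int) (bl : List (Int × Int)) (r c : Int)
    (rest s : List (Int × Int)) :
    [((r + 1 : Int), c), (r, c + 1)].foldl (pvStep n bl) (rest, s) =
      (rest ++ [((r + 1 : Int), c), (r, c + 1)].filter
          (fun y => decide (1 ≤ y.1 ∧ y.1 ≤ n ∧ 1 ≤ y.2 ∧ y.2 ≤ n ∧ ¬ y ∈ bl ∧ ¬ y ∈ s)),
       s ++ [((r + 1 : Int), c), (r, c + 1)].filter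
          (fun y => decide (1 ≤ y.1 ∧ y.1 ≤ n ∧ 1 ≤ y.2 ∧ y.2 ≤ n ∧ ¬ y ∈ bl ∧ ¬ y ∈ s))) := by
  have hne : ¬ (((r, c + 1) : Int × Int) = (r + 1, c)) := by
    intro h; have := (Prod.ext_iff.mp h).1; omega
  simp only [List.foldl, List.filter_cons, List.filter_nil, pvStep]
  by_cases h1 : 0 ≤ r ∧ r < n ∧ 1 ≤ c ∧ c ≤ n ∧ ¬ ((r+1, c) : Int × Int) ∈ bl ∧ ¬ ((r+1, c) : Int × Int) ∈ s <;>
    by_cases h2 : 1 ≤ r ∧ r ≤ n ∧ 0 ≤ c ∧ c < n ∧ ¬ ((r, c+1) : Int × Int) ∈ bl ∧ ¬ ((r, c+1) : Int × Int) ∈ s <;>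
    simp [h1, h2, hne]

lemma pvEscape (n : Int) (bl : List (Int × Int)) (goal : Int × Int)
    (q s : List (Int × Int))
    (hcl : ∀ x ∈ s, x ∉ q → x ≠ goal ∧ ∀ y, pvAdj n bl x y → y ∈ s) :
    ∀ z, pvReach n bl z goal → z ∈ s → ∃ w ∈ q, pvReach n bl w goal := by
  intro z hz
  induction hz using Relation.ReflTransGen.head_induction_on with
  | refl =>
    intro hg
    by_cases hq : goal ∈ q
    · exact ⟨goal, hq, Relation.ReflTransGen.refl⟩
    · exact absurd rfl (hcl goal hg hq).1
  | head hadj _ ih =>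
    rename_i a b' _
    intro ha
    by_cases hq : a ∈ q
    · exact ⟨a, hq, Relation.ReflTransGen.head hadj (by assumption)⟩
    · exact ih ((hcl a ha hq).2 b' hadj)

theorem pvBfs_iff (n : Int) (bl : List (Int × Int)) (goal : Int × Int) :
    ∀ (fuel : Nat) (q s : List (Int × Int)),
    (∀ x ∈ q, x ∈ s) → q.Nodup → s.Nodup →
    (∀ x ∈ s, x ∈ pvGrid n) →
    (∀ x ∈ s, x ∉ q → x ≠ goal ∧ ∀ y, pvAdj n bl x y → y ∈ s) →
    q.length + ((pvGrid n).length - s.length) < fuel →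
    (pvBfs n bl goal fuel q s = true ↔ ∃ x ∈ q, pvReach n bl x goal) := by
  intro fuel
  induction fuel with
  | zero => intro q s _ _ _ _ _ hfuel; omega
  | succ f ih =>
    rintro (_ | ⟨⟨r, c⟩, rest⟩) s hq hqnd hsnd hg hcl hfuel
    · simp [pvBfs]
    · by_cases hgoal : (((r, c) : Int × Int)) = goal
      · simp only [pvBfs, if_pos hgoal, true_iff]
        exact ⟨(r, c), List.mem_cons_self, hgoal ▸ Relation.ReflTransGen.refl⟩
      · have hLHS : pvBfs n bl goal (f + 1) ((r, c) :: rest) s =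
            pvBfs n bl goal f
              (rest ++ [((r + 1 : Int), c), (r, c + 1)].filter
                (fun y => decide (1 ≤ y.1 ∧ y.1 ≤ n ∧ 1 ≤ y.2 ∧ y.2 ≤ n ∧ ¬ y ∈ bl ∧ ¬ y ∈ s)))
              (s ++ [((r + 1 : Int), c), (r, c + 1)].filter
                (fun y => decide (1 ≤ y.1 ∧ y.1 ≤ n ∧ 1 ≤ y.2 ∧ y.2 ≤ n ∧ ¬ y ∈ bl ∧ ¬ y ∈ s))) := by
          simp only [pvBfs, if_neg hgoal, pvStep_foldl]
        set F := [((r + 1 : Int), c), (r, c + 1)].filter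
          (fun y => decide (1 ≤ y.1 ∧ y.1 ≤ n ∧ 1 ≤ y.2 ∧ y.2 ≤ n ∧ ¬ y ∈ bl ∧ ¬ y ∈ s)) with hF
        have hFmem : ∀ y ∈ F, (y = ((r + 1 : Int), c) ∨ y = (r, c + 1)) ∧
            1 ≤ y.1 ∧ y.1 ≤ n ∧ 1 ≤ y.2 ∧ y.2 ≤ n ∧ ¬ y ∈ bl ∧ ¬ y ∈ s := by
          intro y hy
          rw [hF, List.mem_filter] at hy
          refine ⟨by simpa using hy.1, by simpa using of_decide_eq_true hy.2⟩
        have hFadj : ∀ y ∈ F, pvAdj n bl (r, c) y := by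
          intro y hy
          obtain ⟨hc, h1, h2, h3, h4, h5, _⟩ := hFmem y hy
          exact ⟨hc, h1, h2, h3, h4, h5⟩
        have hFcomplete : ∀ y, pvAdj n bl (r, c) y → y ∈ s ∨ y ∈ F := by
          intro y hy
          by_cases hys : y ∈ s
          · exact Or.inl hys
          · right
            obtain ⟨hc, h1, h2, h3, h4, h5⟩ := hy
            rw [hF, List.mem_filter]
            constructor
            · rcases hc with h | h <;> simp [h]
            · exact decide_eq_true (by exact ⟨h1, h2, h3, h4, h5, hys⟩)
        have hFnotins : ∀ y ∈ F, y ∉ s := fun y hy => (hFmem y hy).2.2.2.2.2.2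
        have hFnodup : F.Nodup := by
          apply List.Nodup.filter
          refine List.nodup_cons.mpr ⟨?_, List.nodup_singleton _⟩
          intro h
          rw [List.mem_singleton] at h
          have := (Prod.ext_iff.mp h).1
          omega
        have hrests : ∀ x ∈ rest, x ∈ s := fun x hx => hq x (List.mem_cons_of_mem _ hx)
        have hdisj : ∀ x ∈ F, x ∉ rest := fun x hx hr => hFnotins x hx (hrests x hr)
        have hq' : ∀ x ∈ rest ++ F, x ∈ s ++ F := by
          intro x hx
          rcases List.mem_append.mp hx with h | h
          · exact List.mem_append.mpr (Or.inl (hrests x h))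
          · exact List.mem_append.mpr (Or.inr h)
        have hqnd' : (rest ++ F).Nodup := by
          rw [List.nodup_append]
          exact ⟨(List.nodup_cons.mp hqnd).2, hFnodup, by intro a ha b hb hab; exact hdisj b hb (hab ▸ ha)⟩
        have hsnd' : (s ++ F).Nodup := by
          rw [List.nodup_append]
          exact ⟨hsnd, hFnodup, by intro a ha b hb hab; exact hFnotins b hb (hab ▸ ha)⟩
        have hg' : ∀ x ∈ s ++ F, x ∈ pvGrid n := by
          intro x hx
          rcases List.mem_append.mp hx with h | h
          · exact hg x h
          · obtain ⟨_, h1, h2, h3, h4, _⟩ := hFmem x h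
            exact (pvMem_pvGrid n x).mpr (Or.inr ⟨h1, h2, h3, h4⟩)
        have hcl' : ∀ x ∈ s ++ F, x ∉ rest ++ F →
            x ≠ goal ∧ ∀ y, pvAdj n bl x y → y ∈ s ++ F := by
          intro x hx hnx
          have hxs : x ∈ s := by
            rcases List.mem_append.mp hx with h | h
            · exact h
            · exact absurd (List.mem_append.mpr (Or.inr h)) hnx
          by_cases hxrc : x = ((r, c) : Int × Int)
          · subst hxrc
            refine ⟨hgoal, ?_⟩
            intro y hy
            rcases hFcomplete y hy with h | h
            · exact List.mem_append.mpr (Or.inl h)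
            · exact List.mem_append.mpr (Or.inr h)
          · have hxq : x ∉ ((r, c) :: rest) := by
              intro h
              rcases List.mem_cons.mp h with h | h
              · exact hxrc h
              · exact hnx (List.mem_append.mpr (Or.inl h))
            obtain ⟨h1, h2⟩ := hcl x hxs hxq
            exact ⟨h1, fun y hy => List.mem_append.mpr (Or.inl (h2 y hy))⟩
        have hfuel' : (rest ++ F).length + ((pvGrid n).length - (s ++ F).length) < f := by
          have hle := pvSeen_length_le n (s ++ F) hsnd' hg'
          simp only [List.length_append] at *
          simp only [List.length_cons] at hfuel
          omega
        rw [hLHS, ih (rest ++ F) (s ++ F) hq' hqnd' hsnd' hg' hcl' hfuel']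
        constructor
        · rintro ⟨x, hx, hreach⟩
          rcases List.mem_append.mp hx with h | h
          · exact ⟨x, List.mem_cons_of_mem _ h, hreach⟩
          · exact ⟨(r, c), List.mem_cons_self,
              Relation.ReflTransGen.head (hFadj x h) hreach⟩
        · rintro ⟨x, hx, hreach⟩
          rcases List.mem_cons.mp hx with h | h
          · subst h
            rcases (Relation.ReflTransGen.cases_head hreach) with h | ⟨y, hy, hrest⟩
            · exact absurd h hgoal
            · rcases hFcomplete y hy with hys | hyF
              · exact pvEscape n bl goal (rest ++ F) (s ++ F) hcl' y hrest
                  (List.mem_append.mpr (Or.inl hys))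
              · exact ⟨y, List.mem_append.mpr (Or.inr hyF), hrest⟩
          · exact ⟨x, List.mem_append.mpr (Or.inl h), hreach⟩

lemma pvRight (n : Int) (bl : List (Int × Int)) :
    ∀ (k : Nat) (row c0 : Int), pvReach n bl (1, 1) (row, c0) →
    1 ≤ row → row ≤ n → ∀ c, c = c0 + (k : Int) → c ≤ n →
    (∀ j, c0 < j → j ≤ c → ¬ ((row, j) : Int × Int) ∈ bl) →
    pvReach n bl (1, 1) (row, c) := by
  intro k
  induction k with
  | zero => intro row c0 h _ _ c hc _ _; simpa [show c = c0 by omega] using h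
  | succ k ih =>
    intro row c0 h hr1 hr2 c hc hcn hfree
    have hc0 : 1 ≤ c0 := (pvReach_mono n bl _ _ h).2
    have hprev : pvReach n bl (1, 1) (row, c - 1) := by
      apply ih row c0 h hr1 hr2 (c - 1) (by omega) (by omega)
      intro j hj1 hj2
      exact hfree j hj1 (by omega)
    refine Relation.ReflTransGen.tail hprev ?_
    refine ⟨Or.inr (by simp), by simpa using hr1, by simpa using hr2, by simp; omega, by simpa using hcn, ?_⟩
    exact hfree c (by omega) (by omega)

lemma pvRow1 (perm : List Int) (hn : 1 ≤ (perm.length : Int))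
    (hs : ¬ ((1, 1) : Int × Int) ∈ pvBl perm) (c : Int) :
    pvReach (perm.length) (pvBl perm) (1, 1) (1, c) ↔
      1 ≤ c ∧ c ≤ (perm.length : Int) ∧ ∀ j, 1 ≤ j → j ≤ c → ¬ ((1, j) : Int × Int) ∈ pvBl perm := by
  constructor
  · have key : ∀ (k : Nat) (c : Int), c.toNat = k →
        pvReach (perm.length) (pvBl perm) (1, 1) (1, c) →
        1 ≤ c ∧ c ≤ (perm.length : Int) ∧ ∀ j, 1 ≤ j → j ≤ c → ¬ ((1, j) : Int × Int) ∈ pvBl perm := by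
      intro k
      induction k using Nat.strong_induction_on with
      | _ k ih =>
        intro c hck hr
        rcases Relation.ReflTransGen.cases_tail hr with heq | ⟨p, hp, hadj⟩
        · have hc1 : c = 1 := by
            have := (Prod.ext_iff.mp heq).2; omega
          subst hc1
          exact ⟨le_refl _, hn, fun j hj1 hj2 => by
            have : j = 1 := by omega
            subst this; exact hs⟩
        · obtain ⟨hcase, h1, h2, h3, h4, h5⟩ := hadj
          rcases hcase with h | h
          · exfalso
            have hp1 : 1 ≤ p.1 := (pvReach_mono _ _ _ _ hp).1
            have := (Prod.ext_iff.mp h).1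
            omega
          · have hpv : p = (1, c - 1) := by
              have e1 := (Prod.ext_iff.mp h).1
              have e2 := (Prod.ext_iff.mp h).2
              cases p
              simp at e1 e2 ⊢
              omega
            rw [hpv] at hp
            have hc1 : 1 ≤ c - 1 := (pvReach_mono _ _ _ _ hp).2
            obtain ⟨_, _, hfree⟩ := ih (c - 1).toNat (by omega) (c - 1) rfl hp
            refine ⟨by omega, by simpa using h4, ?_⟩
            intro j hj1 hj2
            by_cases hj : j ≤ c - 1
            · exact hfree j hj1 hj
            · have : j = c := by omega
              subst this; exact h5
    exact fun h => key c.toNat c rfl h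
  · rintro ⟨h1, h2, h3⟩
    apply pvRight (perm.length) (pvBl perm) (c - 1).toNat 1 1
      Relation.ReflTransGen.refl (by omega) (by omega) c (by omega) h2
    intro j hj1 hj2
    exact h3 j (by omega) hj2

lemma pvRowSucc (perm : List Int) (r : Int) (hr : 1 ≤ r)
    (hrn : r + 1 ≤ (perm.length : Int)) (c : Int) :
    pvReach (perm.length) (pvBl perm) (1, 1) (r + 1, c) ↔
      ∃ c0, pvReach (perm.length) (pvBl perm) (1, 1) (r, c0) ∧ c0 ≤ c ∧ c ≤ (perm.length : Int) ∧
        ∀ j, c0 ≤ j → j ≤ c → ¬ ((r + 1, j) : Int × Int) ∈ pvBl perm := by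
  constructor
  · have key : ∀ (k : Nat) (c : Int), c.toNat = k →
        pvReach (perm.length) (pvBl perm) (1, 1) (r + 1, c) →
        ∃ c0, pvReach (perm.length) (pvBl perm) (1, 1) (r, c0) ∧ c0 ≤ c ∧ c ≤ (perm.length : Int) ∧
          ∀ j, c0 ≤ j → j ≤ c → ¬ ((r + 1, j) : Int × Int) ∈ pvBl perm := by
      intro k
      induction k using Nat.strong_induction_on with
      | _ k ih =>
        intro c hck hr'
        rcases Relation.ReflTransGen.cases_tail hr' with heq | ⟨p, hp, hadj⟩
        · exfalso
          have := (Prod.ext_iff.mp heq).1; omega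
        · obtain ⟨hcase, h1, h2, h3, h4, h5⟩ := hadj
          rcases hcase with h | h
          · have hpv : p = (r, c) := by
              have e1 := (Prod.ext_iff.mp h).1
              have e2 := (Prod.ext_iff.mp h).2
              cases p; simp at e1 e2 ⊢; omega
            rw [hpv] at hp
            refine ⟨c, hp, le_refl _, by simpa using h4, ?_⟩
            intro j hj1 hj2
            have : j = c := by omega
            subst this; exact h5
          · have hpv : p = (r + 1, c - 1) := by
              have e1 := (Prod.ext_iff.mp h).1
              have e2 := (Prod.ext_iff.mp h).2
              cases p; simp at e1 e2 ⊢; omega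
            rw [hpv] at hp
            have hc1 : 1 ≤ c - 1 := (pvReach_mono _ _ _ _ hp).2
            obtain ⟨c0, hc0, hle, _, hfree⟩ := ih (c - 1).toNat (by omega) (c - 1) rfl hp
            refine ⟨c0, hc0, by omega, by simpa using h4, ?_⟩
            intro j hj1 hj2
            by_cases hj : j ≤ c - 1
            · exact hfree j hj1 hj
            · have : j = c := by omega
              subst this; exact h5
    exact fun h => key c.toNat c rfl h
  · rintro ⟨c0, hc0, hle, hcn, hfree⟩
    have hb1 : 1 ≤ c0 := (pvReach_mono _ _ _ _ hc0).2
    have hdown : pvReach (perm.length) (pvBl perm) (1, 1) (r + 1, c0) := by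
      refine Relation.ReflTransGen.tail hc0 ?_
      exact ⟨Or.inl (by simp), by simp; omega, by simpa using hrn, by simpa using hb1,
        by simp; omega, hfree c0 (le_refl _) hle⟩
    apply pvRight (perm.length) (pvBl perm) (c - c0).toNat (r + 1) c0 hdown (by omega)
      (by omega) c (by omega) hcn
    intro j hj1 hj2
    exact hfree j (by omega) hj2

def pvM1Spec (b : Int) (I : List (Int × Int)) (o : Option Int) : Prop :=
  match o with
  | none => ∀ lh ∈ I, ¬ lh.1 < b
  | some m => (∃ lh ∈ I, lh.1 = m) ∧ m < b ∧ ∀ lh ∈ I, lh.1 < b → m ≤ lh.1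

def pvM2Spec (b : Int) (I : List (Int × Int)) (o : Option Int) : Prop :=
  match o with
  | none => ∀ lh ∈ I, ¬ lh.2 > b
  | some m => (∃ lh ∈ I, lh.2 > b ∧ m = max lh.1 (b + 1)) ∧
      ∀ lh ∈ I, lh.2 > b → m ≤ max lh.1 (b + 1)

lemma pvMins_general (b : Int) :
    ∀ (I J : List (Int × Int)) (ms : Option Int × Option Int),
    pvM1Spec b J ms.1 → pvM2Spec b J ms.2 →
    pvM1Spec b (J ++ I) (I.foldl (pvRowMins b) ms).1 ∧
      pvM2Spec b (J ++ I) (I.foldl (pvRowMins b) ms).2 := by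
  intro I
  induction I with
  | nil => intro J ms h1 h2; simpa using ⟨h1, h2⟩
  | cons lh I ih =>
    intro J ms h1 h2
    have step1 : pvM1Spec b (J ++ [lh]) (pvRowMins b ms lh).1 := by
      rcases hms : ms.1 with _ | m
      · rw [hms] at h1
        simp only [pvRowMins, hms]
        by_cases hlt : lh.1 < b
        · simp only [if_pos hlt, pvM1Spec]
          exact ⟨⟨lh, by simp, rfl⟩, hlt, fun lh' hlh' hlt' => by
            rcases List.mem_append.mp hlh' with h | h
            · exact absurd hlt' (h1 lh' h)
            · rw [List.mem_singleton] at h; subst h; omega⟩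
        · simp only [if_neg hlt, pvM1Spec]
          intro lh' hlh'
          rcases List.mem_append.mp hlh' with h | h
          · exact h1 lh' h
          · simp at h; subst h; exact hlt
      · rw [hms] at h1
        obtain ⟨⟨w, hw, hwm⟩, hmb, hmin⟩ := h1
        simp only [pvRowMins, hms]
        by_cases hlt : lh.1 < b ∧ lh.1 < m
        · simp only [if_pos hlt, pvM1Spec]
          refine ⟨⟨lh, by simp, rfl⟩, hlt.1, ?_⟩
          intro lh' hlh' hlt'
          rcases List.mem_append.mp hlh' with h | h
          · have := hmin lh' h hlt'; omega
          · rw [List.mem_singleton] at h; subst h; omega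
        · simp only [if_neg hlt, pvM1Spec]
          refine ⟨⟨w, List.mem_append.mpr (Or.inl hw), hwm⟩, hmb, ?_⟩
          intro lh' hlh' hlt'
          rcases List.mem_append.mp hlh' with h | h
          · exact hmin lh' h hlt'
          · simp at h; subst h
            rcases (not_and.mp hlt hlt') with h
            · omega
    have step2 : pvM2Spec b (J ++ [lh]) (pvRowMins b ms lh).2 := by
      by_cases hgt : lh.2 > b
      · rcases hms : ms.2 with _ | m
        · rw [hms] at h2
          simp only [pvRowMins, hms, if_pos hgt, pvM2Spec]
          constructor
          · refine ⟨lh, by simp, hgt, ?_⟩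
            by_cases hl : lh.1 > b <;> simp [hl] <;> omega
          · intro lh' hlh' hgt'
            rcases List.mem_append.mp hlh' with h | h
            · exact absurd hgt' (h2 lh' h)
            · simp at h; subst h
              by_cases hl : lh'.1 > b <;> simp [hl] <;> omega
        · rw [hms] at h2
          obtain ⟨⟨w, hw, hwgt, hwm⟩, hmin⟩ := h2
          simp only [pvRowMins, hms, if_pos hgt]
          set cand := if lh.1 > b then lh.1 else b + 1 with hcand
          have hcand_eq : cand = max lh.1 (b + 1) := by
            rw [hcand]; by_cases hl : lh.1 > b <;> simp [hl] <;> omega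
          by_cases hc : cand < m
          · simp only [if_pos hc, pvM2Spec]
            refine ⟨⟨lh, by simp, hgt, hcand_eq.symm ▸ rfl⟩, ?_⟩
            intro lh' hlh' hgt'
            rcases List.mem_append.mp hlh' with h | h
            · have := hmin lh' h hgt'; omega
            · simp at h; subst h; omega
          · simp only [if_neg hc, pvM2Spec]
            refine ⟨⟨w, List.mem_append.mpr (Or.inl hw), hwgt, hwm⟩, ?_⟩
            intro lh' hlh' hgt'
            rcases List.mem_append.mp hlh' with h | h
            · exact hmin lh' h hgt'
            · simp at h; subst h; omega
      · rcases hms : ms.2 with _ | m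
        · rw [hms] at h2
          simp only [pvRowMins, hms, if_neg hgt, pvM2Spec]
          intro lh' hlh'
          rcases List.mem_append.mp hlh' with h | h
          · exact h2 lh' h
          · simp at h; subst h; exact hgt
        · rw [hms] at h2
          obtain ⟨⟨w, hw, hwgt, hwm⟩, hmin⟩ := h2
          simp only [pvRowMins, hms, if_neg hgt, pvM2Spec]
          refine ⟨⟨w, List.mem_append.mpr (Or.inl hw), hwgt, hwm⟩, ?_⟩
          intro lh' hlh' hgt'
          rcases List.mem_append.mp hlh' with h | h
          · exact hmin lh' h hgt'
          · simp at h; subst h; exact absurd hgt' hgt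
    have := ih (J ++ [lh]) (pvRowMins b ms lh) step1 step2
    simpa [List.append_assoc] using this

lemma pvMins_spec (b : Int) (I : List (Int × Int)) :
    pvM1Spec b I (I.foldl (pvRowMins b) (none, none)).1 ∧
      pvM2Spec b I (I.foldl (pvRowMins b) (none, none)).2 := by
  have := pvMins_general b I [] (none, none) (by simp [pvM1Spec]) (by simp [pvM2Spec])
  simpa using this

def pvRep (perm : List Int) (r : Int) (I : List (Int × Int)) : Prop :=
  I ≠ [] ∧
  (∀ lh ∈ I, 1 ≤ lh.1 ∧ lh.1 ≤ lh.2 ∧ lh.2 ≤ (perm.length : Int)) ∧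
  (∀ lh ∈ I, (I.headD (0, 0)).1 ≤ lh.1) ∧
  (∀ c, (∃ lh ∈ I, lh.1 ≤ c ∧ c ≤ lh.2) ↔
      (1 ≤ c ∧ c ≤ (perm.length : Int) ∧ pvReach (perm.length) (pvBl perm) (1, 1) (r, c)))

def pvStOK (perm : List Int) (r : Int) (st : Option (List (Int × Int))) : Prop :=
  match st with
  | some I => pvRep perm r I
  | none => ∀ c, ¬ (1 ≤ c ∧ c ≤ (perm.length : Int) ∧
      pvReach (perm.length) (pvBl perm) (1, 1) (r, c))

lemma pvBlRow (perm : List Int) (ρ j : Int) (hρ1 : 1 ≤ ρ) (hρ2 : ρ ≤ (perm.length : Int)) :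
    ((ρ, j) : Int × Int) ∈ pvBl perm ↔ j = perm.getD (ρ - 1).toNat 0 := by
  rw [pvMem_pvBl']
  constructor
  · rintro ⟨_, _, h⟩; exact h
  · intro h; exact ⟨hρ1, hρ2, h⟩

lemma pvRowStep_ok (perm : List Int) (r b : Int) (h1 : 1 ≤ r)
    (h2 : r + 1 ≤ (perm.length : Int)) (hb : b = perm.getD (r + 1 - 1).toNat 0)
    (st : Option (List (Int × Int))) (hst : pvStOK perm r st) :
    pvStOK perm (r + 1) (pvRowStep (perm.length) st b) := by
  have hrow : ∀ j : Int, (((r + 1, j) : Int × Int) ∈ pvBl perm) ↔ j = b := by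
    intro j
    rw [pvBlRow perm (r + 1) j (by omega) h2, hb]
  have hSucc : ∀ c, pvReach (perm.length) (pvBl perm) (1, 1) (r + 1, c) ↔
      ∃ c0, pvReach (perm.length) (pvBl perm) (1, 1) (r, c0) ∧ c0 ≤ c ∧
        c ≤ (perm.length : Int) ∧ ∀ j, c0 ≤ j → j ≤ c → j ≠ b := by
    intro c
    rw [pvRowSucc perm r h1 h2 c]
    constructor
    · rintro ⟨c0, ha, hb', hc', hd⟩
      exact ⟨c0, ha, hb', hc', fun j hj1 hj2 hjb => (hd j hj1 hj2) ((hrow j).mpr hjb)⟩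
    · rintro ⟨c0, ha, hb', hc', hd⟩
      exact ⟨c0, ha, hb', hc', fun j hj1 hj2 hjbl => hd j hj1 hj2 ((hrow j).mp hjbl)⟩
  match st with
  | none =>
    simp only [pvRowStep, pvStOK]
    rintro c ⟨hc1, hc2, hreach⟩
    obtain ⟨c0, hc0, hle, _, _⟩ := (hSucc c).mp hreach
    have hb1 : 1 ≤ c0 := (pvReach_mono _ _ _ _ hc0).2
    exact hst c0 ⟨hb1, by omega, hc0⟩
  | some I =>
    obtain ⟨hne, hshape, hhead, hmem⟩ := hst
    by_cases hbr : 1 ≤ b ∧ b ≤ (perm.length : Int)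
    · obtain ⟨hm1, hm2⟩ := pvMins_spec b I
      -- the combined characterization of row r+1
      have lemA : ∀ c, (1 ≤ c ∧ c ≤ (perm.length : Int) ∧
            pvReach (perm.length) (pvBl perm) (1, 1) (r + 1, c)) ↔
          ((∃ m1, (I.foldl (pvRowMins b) (none, none)).1 = some m1 ∧ m1 ≤ c ∧ c ≤ b - 1) ∨
           (∃ m2, (I.foldl (pvRowMins b) (none, none)).2 = some m2 ∧ m2 ≤ c ∧
              c ≤ (perm.length : Int))) := by
        intro c
        constructor
        · rintro ⟨hc1, hcN, hS⟩
          obtain ⟨c0, hSr0, hle, _, hfree⟩ := (hSucc c).mp hS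
          have hc01 : 1 ≤ c0 := (pvReach_mono _ _ _ _ hSr0).2
          obtain ⟨lh, hlhI, hlo, hhi⟩ := (hmem c0).mpr ⟨hc01, by omega, hSr0⟩
          rcases lt_trichotomy c b with hcb | hcb | hcb
          · left
            rcases hM1 : (I.foldl (pvRowMins b) (none, none)).1 with _ | m1
            · rw [hM1] at hm1
              exact absurd (by omega : lh.1 < b) (hm1 lh hlhI)
            · rw [hM1] at hm1
              obtain ⟨_, _, hmin⟩ := hm1
              exact ⟨m1, rfl, by have := hmin lh hlhI (by omega); omega, by omega⟩
          · exact absurd rfl (hfree b (by omega) (by omega))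
          · have hc0b : b < c0 := by
              by_contra hcon
              exact (hfree b (by omega) (by omega)) rfl
            right
            rcases hM2 : (I.foldl (pvRowMins b) (none, none)).2 with _ | m2
            · rw [hM2] at hm2
              exact absurd (by omega : lh.2 > b) (hm2 lh hlhI)
            · rw [hM2] at hm2
              obtain ⟨_, hmin⟩ := hm2
              refine ⟨m2, rfl, ?_, hcN⟩
              have := hmin lh hlhI (by omega)
              omega
        · rintro (⟨m1, hM1, hm1c, hcb⟩ | ⟨m2, hM2, hm2c, hcN⟩)
          · rw [hM1] at hm1
            obtain ⟨⟨lh, hlhI, hlh1⟩, hm1b, _⟩ := hm1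
            obtain ⟨hs1, hs2, hs3⟩ := hshape lh hlhI
            have hSm : pvReach (perm.length) (pvBl perm) (1, 1) (r, m1) :=
              ((hmem m1).mp ⟨lh, hlhI, by omega, by omega⟩).2.2
            refine ⟨by omega, by omega, (hSucc c).mpr ⟨m1, hSm, hm1c, by omega, ?_⟩⟩
            intro j _ hj2
            omega
          · rw [hM2] at hm2
            obtain ⟨⟨lh, hlhI, hlh2, hm2eq⟩, _⟩ := hm2
            obtain ⟨hs1, hs2, hs3⟩ := hshape lh hlhI
            have hSm : pvReach (perm.length) (pvBl perm) (1, 1) (r, m2) :=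
              ((hmem m2).mp ⟨lh, hlhI, by omega, by omega⟩).2.2
            refine ⟨by omega, hcN, (hSucc c).mpr ⟨m2, hSm, hm2c, hcN, ?_⟩⟩
            intro j hj1 _
            omega
      have hm1shape : ∀ m1, (I.foldl (pvRowMins b) (none, none)).1 = some m1 →
          1 ≤ m1 ∧ m1 ≤ b - 1 := by
        intro m1 hM1
        rw [hM1] at hm1
        obtain ⟨⟨lh, hlhI, hlh1⟩, hm1b, _⟩ := hm1
        have := hshape lh hlhI
        omega
      have hm2shape : ∀ m2, (I.foldl (pvRowMins b) (none, none)).2 = some m2 →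
          b + 1 ≤ m2 ∧ m2 ≤ (perm.length : Int) := by
        intro m2 hM2
        rw [hM2] at hm2
        obtain ⟨⟨lh, hlhI, hlh2, hm2eq⟩, _⟩ := hm2
        have := hshape lh hlhI
        omega
      simp only [pvRowStep]
      rw [if_pos hbr]
      rcases hM1 : (I.foldl (pvRowMins b) (none, none)).1 with _ | m1 <;>
        rcases hM2 : (I.foldl (pvRowMins b) (none, none)).2 with _ | m2 <;>
        simp only [List.append_nil, List.nil_append, List.singleton_append]
      · -- no reachable columns in row r+1
        simp only [pvStOK]
        rintro c hcon
        rcases (lemA c).mp hcon with ⟨m1, heq, _⟩ | ⟨m2, heq, _⟩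
        · rw [hM1] at heq; simp at heq
        · rw [hM2] at heq; simp at heq
      · -- only the right interval
        have : ([((m2 : Int), (perm.length : Int))] : List (Int × Int)) ≠ [] := by simp
        rw [if_neg this]
        obtain ⟨hs1, hs2⟩ := hm2shape m2 hM2
        refine ⟨by simp, ?_, by simp, ?_⟩
        · intro lh hlh
          rw [List.mem_singleton] at hlh
          subst hlh
          constructor <;> simp <;> omega
        · intro c
          constructor
          · rintro ⟨lh, hlh, hl, hr⟩
            rw [List.mem_singleton] at hlh
            subst hlh
            exact (lemA c).mpr (Or.inr ⟨m2, hM2, by simpa using hl, by simpa using hr⟩)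
          · intro h
            rcases (lemA c).mp h with ⟨m1, heq, _⟩ | ⟨m2', heq, hl, hr⟩
            · rw [hM1] at heq; simp at heq
            · rw [hM2] at heq
              simp at heq
              subst heq
              exact ⟨(m2, (perm.length : Int)), by simp, hl, hr⟩
      · -- only the left interval
        have : ([((m1 : Int), b - 1)] : List (Int × Int)) ≠ [] := by simp
        rw [if_neg this]
        obtain ⟨hs1, hs2⟩ := hm1shape m1 hM1
        refine ⟨by simp, ?_, by simp, ?_⟩
        · intro lh hlh
          rw [List.mem_singleton] at hlh
          subst hlh
          constructor <;> simp <;> omega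
        · intro c
          constructor
          · rintro ⟨lh, hlh, hl, hr⟩
            rw [List.mem_singleton] at hlh
            subst hlh
            exact (lemA c).mpr (Or.inl ⟨m1, hM1, by simpa using hl, by simpa using hr⟩)
          · intro h
            rcases (lemA c).mp h with ⟨m1', heq, hl, hr⟩ | ⟨m2, heq, _⟩
            · rw [hM1] at heq
              simp at heq
              subst heq
              exact ⟨(m1, b - 1), by simp, hl, hr⟩
            · rw [hM2] at heq; simp at heq
      · -- both intervals
        have : ([((m1 : Int), b - 1), (m2, (perm.length : Int))] : List (Int × Int)) ≠ [] := by simp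
        rw [if_neg this]
        obtain ⟨hs1, hs2⟩ := hm1shape m1 hM1
        obtain ⟨hs3, hs4⟩ := hm2shape m2 hM2
        refine ⟨by simp, ?_, ?_, ?_⟩
        · intro lh hlh
          rcases List.mem_cons.mp hlh with h | h
          · subst h; constructor <;> simp <;> omega
          · rw [List.mem_singleton] at h
            subst h; constructor <;> simp <;> omega
        · intro lh hlh
          rcases List.mem_cons.mp hlh with h | h
          · subst h; simp
          · rw [List.mem_singleton] at h
            subst h; simp; omega
        · intro c
          constructor
          · rintro ⟨lh, hlh, hl, hr⟩
            rcases List.mem_cons.mp hlh with h | h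
            · subst h
              exact (lemA c).mpr (Or.inl ⟨m1, hM1, by simpa using hl, by simpa using hr⟩)
            · rw [List.mem_singleton] at h
              subst h
              exact (lemA c).mpr (Or.inr ⟨m2, hM2, by simpa using hl, by simpa using hr⟩)
          · intro h
            rcases (lemA c).mp h with ⟨m1', heq, hl, hr⟩ | ⟨m2', heq, hl, hr⟩
            · rw [hM1] at heq
              simp at heq
              subst heq
              exact ⟨(m1, b - 1), by simp, hl, hr⟩
            · rw [hM2] at heq
              simp at heq
              subst heq
              exact ⟨(m2, (perm.length : Int)), by simp, hl, hr⟩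
    · -- the blocked column of row r+1 is outside the board: the whole row is free
      have hfree : ∀ j : Int, 1 ≤ j → j ≤ (perm.length : Int) →
          ¬ ((r + 1, j) : Int × Int) ∈ pvBl perm := by
        intro j hj1 hj2 hcon
        have := (hrow j).mp hcon
        omega
      rcases hI : I with _ | ⟨hd, tl⟩
      · exact absurd hI hne
      · subst hI
        obtain ⟨hd1, hd2, hd3⟩ := hshape hd List.mem_cons_self
        simp only [pvRowStep]
        rw [if_neg hbr]
        simp only [List.headD_cons, pvStOK]
        refine ⟨by simp, ?_, by simp, ?_⟩
        · intro lh hlh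
          rw [List.mem_singleton] at hlh
          subst hlh
          constructor <;> simp <;> omega
        · intro c
          constructor
          · rintro ⟨lh, hlh, hl, hr⟩
            rw [List.mem_singleton] at hlh
            subst hlh
            simp only at hl hr
            have hShd : pvReach (perm.length) (pvBl perm) (1, 1) (r, hd.1) :=
              ((hmem hd.1).mp ⟨hd, List.mem_cons_self, le_refl _, by omega⟩).2.2
            refine ⟨by omega, by omega, (hSucc c).mpr ⟨hd.1, hShd, hl, hr, ?_⟩⟩
            intro j hj1 hj2 hjb
            exact hfree j (by omega) (by omega) ((hrow j).mpr hjb)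
          · rintro ⟨hc1, hcN, hS⟩
            obtain ⟨c0, hSr0, hle, _, _⟩ := (hSucc c).mp hS
            have hc01 : 1 ≤ c0 := (pvReach_mono _ _ _ _ hSr0).2
            obtain ⟨lh, hlhI, hlo, hhi⟩ := (hmem c0).mpr ⟨hc01, by omega, hSr0⟩
            have := hhead lh hlhI
            simp only [List.headD_cons] at this
            exact ⟨(hd.1, (perm.length : Int)), by simp, by omega, by omega⟩

lemma pvFold_ok (perm : List Int) :
    ∀ (ys : List Int) (r : Int) (st : Option (List (Int × Int))), 1 ≤ r →
    r + ys.length = (perm.length : Int) →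
    (∀ i : Nat, i < ys.length → ys.getD i 0 = perm.getD (r + i).toNat 0) →
    pvStOK perm r st →
    pvStOK perm (perm.length) (ys.foldl (pvRowStep (perm.length)) st) := by
  intro ys
  induction ys with
  | nil =>
    intro r st _ hlen _ hst
    simp only [List.foldl_nil]
    have : r = (perm.length : Int) := by simpa using hlen
    exact this ▸ hst
  | cons y ys ih =>
    intro r st hr hlen hidx hst
    simp only [List.foldl_cons]
    have hy : y = perm.getD (r + 1 - 1).toNat 0 := by
      have h0 := hidx 0 (by simp)
      rw [List.getD_cons_zero] at h0
      have he : (r + ((0 : Nat) : Int)).toNat = (r + 1 - 1).toNat := by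
        simp
      rw [h0, he]
    have hlen' : r + 1 ≤ (perm.length : Int) := by
      simp only [List.length_cons] at hlen
      push_cast at hlen
      omega
    apply ih (r + 1) (pvRowStep (perm.length) st y) (by omega)
    · simp only [List.length_cons] at hlen
      push_cast at hlen ⊢
      omega
    · intro i hi
      have := hidx (i + 1) (by simpa using Nat.succ_lt_succ hi)
      rw [List.getD_cons_succ] at this
      rw [this]
      congr 1
      omega
    · exact pvRowStep_ok perm r y hr hlen' hy st hst

lemma pvAiff (perm : List Int) (hN : 1 ≤ (perm.length : Int)) :
    is_open_bruteforce perm = true ↔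
      (¬ ((1, 1) : Int × Int) ∈ pvBl perm ∧
       ¬ (((perm.length : Int), (perm.length : Int)) : Int × Int) ∈ pvBl perm ∧
       pvReach (perm.length) (pvBl perm) (1, 1) ((perm.length : Int), (perm.length : Int))) := by
  simp only [is_open_bruteforce]
  by_cases hblk : (((1, 1) : Int × Int) ∈ pvBl perm) ∨
      ((((perm.length : Int), (perm.length : Int)) : Int × Int) ∈ pvBl perm)
  · rw [if_pos hblk]
    simp only [Bool.false_eq_true, false_iff]
    rintro ⟨ha, hb, _⟩
    exact hblk.elim ha hb
  · rw [if_neg hblk]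
    push_neg at hblk
    have hbfs := pvBfs_iff (perm.length) (pvBl perm) ((perm.length : Int), (perm.length : Int))
      ((perm.length : Int).toNat * (perm.length : Int).toNat + 2) [(1, 1)] [(1, 1)]
      (by intro x hx; exact hx) (List.nodup_singleton _) (List.nodup_singleton _)
      (by
        intro x hx
        rw [List.mem_singleton] at hx
        subst hx
        exact (pvMem_pvGrid _ _).mpr (Or.inl rfl))
      (by intro x hx hnx; exact absurd hx hnx)
      (by rw [pvGrid_length]; simp only [List.length_singleton]; omega)
    rw [hbfs]
    constructor
    · rintro ⟨x, hx, hr⟩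
      rw [List.mem_singleton] at hx
      subst hx
      exact ⟨hblk.1, hblk.2, hr⟩
    · rintro ⟨_, _, hr⟩
      exact ⟨(1, 1), List.mem_singleton_self _, hr⟩

theorem pvMain (perm : List Int) : is_open_bruteforce perm = is_open_bruteforce_alt perm := by
  by_cases hnil : perm = []
  · subst hnil
    decide
  · apply Bool.coe_iff_coe.mp
    have hN : 1 ≤ (perm.length : Int) := by
      cases perm with
      | nil => exact absurd rfl hnil
      | cons a l => simp
    have hF1 : perm.getD (0 : Nat) 0 = perm.headD 0 := by
      cases perm with
      | nil => rfl
      | cons a l => rfl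
    have hF2 : (perm.tail.length : Int) = (perm.length : Int) - 1 := by
      cases perm with
      | nil => exact absurd rfl hnil
      | cons a l => simp
    have hF3 : ∀ i : Nat, perm.tail.getD i 0 = perm.getD (i + 1) 0 := by
      intro i
      cases perm with
      | nil => rfl
      | cons a l => rfl
    have hstartBl : (((1, 1) : Int × Int) ∈ pvBl perm) ↔ perm.headD 0 = 1 := by
      rw [pvBlRow perm 1 1 (le_refl 1) hN]
      rw [show ((1 : Int) - 1).toNat = (0 : Nat) by omega, hF1]
      exact eq_comm
    rw [pvAiff perm hN]
    apply Iff.symm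
    simp only [is_open_bruteforce_alt]
    rw [if_neg (by omega : ¬ ((perm.length : Int) = 0))]
    by_cases hp0 : perm.headD 0 = 1
    · rw [if_pos hp0]
      simp only [Bool.false_eq_true, false_iff]
      rintro ⟨ha, _, _⟩
      exact ha (hstartBl.mpr hp0)
    · rw [if_neg hp0]
      have hstart : ¬ ((1, 1) : Int × Int) ∈ pvBl perm := fun h => hp0 (hstartBl.mp h)
      have hrowbl : ∀ j : Int, (((1, j) : Int × Int) ∈ pvBl perm) ↔ j = perm.headD 0 := by
        intro j
        rw [pvBlRow perm 1 j (le_refl 1) hN]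
        rw [show ((1 : Int) - 1).toNat = (0 : Nat) by omega, hF1]
      have hrep1 : pvRep perm 1
          [((1 : Int), if 1 ≤ perm.headD 0 ∧ perm.headD 0 ≤ (perm.length : Int)
              then perm.headD 0 - 1 else (perm.length : Int))] := by
        by_cases hin : 1 ≤ perm.headD 0 ∧ perm.headD 0 ≤ (perm.length : Int)
        · rw [if_pos hin]
          refine ⟨by simp, ?_, by simp, ?_⟩
          · intro lh hlh
            rw [List.mem_singleton] at hlh
            subst hlh
            refine ⟨le_refl 1, by omega, by omega⟩
          · intro c
            rw [pvRow1 perm hN hstart c]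
            constructor
            · rintro ⟨lh, hlh, hl, hr⟩
              rw [List.mem_singleton] at hlh
              subst hlh
              refine ⟨hl, by omega, hl, by omega, ?_⟩
              intro j hj1 hj2 hcon
              have := (hrowbl j).mp hcon
              omega
            · rintro ⟨hc1, hc2, _, _, hfree⟩
              refine ⟨(1, perm.headD 0 - 1), List.mem_singleton_self _, hc1, ?_⟩
              by_contra hcon
              exact (hfree (perm.headD 0) (by omega) (by omega)) ((hrowbl (perm.headD 0)).mpr rfl)
        · rw [if_neg hin]
          refine ⟨by simp, ?_, by simp, ?_⟩
          · intro lh hlh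
            rw [List.mem_singleton] at hlh
            subst hlh
            exact ⟨le_refl 1, hN, le_refl _⟩
          · intro c
            rw [pvRow1 perm hN hstart c]
            constructor
            · rintro ⟨lh, hlh, hl, hr⟩
              rw [List.mem_singleton] at hlh
              subst hlh
              refine ⟨hl, hr, hl, hr, ?_⟩
              intro j hj1 hj2 hcon
              have := (hrowbl j).mp hcon
              omega
            · rintro ⟨hc1, hc2, _⟩
              exact ⟨(1, (perm.length : Int)), List.mem_singleton_self _, hc1, hc2⟩
      have hfin := pvFold_ok perm perm.tail 1
        (some [((1 : Int), if 1 ≤ perm.headD 0 ∧ perm.headD 0 ≤ (perm.length : Int)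
            then perm.headD 0 - 1 else (perm.length : Int))])
        (le_refl 1)
        (by omega)
        (by
          intro i hi
          rw [show ((1 : Int) + (i : Int)).toNat = i + 1 by omega]
          exact hF3 i)
        hrep1
      rcases hfold : perm.tail.foldl (pvRowStep (perm.length)) (some
          [((1 : Int), if 1 ≤ perm.headD 0 ∧ perm.headD 0 ≤ (perm.length : Int)
            then perm.headD 0 - 1 else (perm.length : Int))]) with _ | I <;>
        rw [hfold] at hfin <;> simp only [pvStOK] at hfin
      · simp only [Bool.false_eq_true, false_iff]
        rintro ⟨_, _, hr⟩
        exact hfin ((perm.length : Int)) ⟨hN, le_refl _, hr⟩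
      · obtain ⟨_, _, _, hmem⟩ := hfin
        rw [List.any_eq_true]
        constructor
        · rintro ⟨lh, hlh, hdec⟩
          have hlh' := of_decide_eq_true hdec
          have hr := ((hmem ((perm.length : Int))).mp ⟨lh, hlh, hlh'.1, hlh'.2⟩).2.2
          refine ⟨hstart, ?_, hr⟩
          rcases pvReach_dest _ _ _ hr with h | h
          · rw [h]
            exact hstart
          · exact h.2.2.2.2
        · rintro ⟨_, _, hr⟩
          obtain ⟨lh, hlh, hl, hr'⟩ := (hmem ((perm.length : Int))).mpr ⟨hN, le_refl _, hr⟩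
          exact ⟨lh, hlh, decide_eq_true ⟨hl, hr'⟩⟩

-- ===== VERDICT (by name: the statement is the Claim_ definition above) =====
theorem is_open_bruteforce_spec : Claim_equal_is_open_bruteforce := by
  intro perm _
  unfold Spec_is_open_bruteforce
  exact pvMain perm
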